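-- pv_equiv track=rewrite | github.com/peiswang/MicroNetChallenge | flops_utils_final.py | adder_tree
-- ===== SOURCE A (Python) =====
-- import math
--
-- def adder_tree(base, length):
--     count = 0
--     base_i = base
--     while(length>1):
--         count_i = length // 2
--         count += count_i * base_i
--         length = math.ceil(length/2)
--         base_i +=1
--     return count, base_i
-- ===== SOURCE B (Python) =====
-- import math
--
-- def adder_tree(base, length):
--     if length <= 1:
--         return 0, base
--     c, b = adder_tree(base + 1, math.ceil(length / 2))
--     return (length // 2) * base + c, b
-- ===== Notes on version B (the rewrite author's own statement) =====
-- stated objective: alternative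
-- what changed: Iterative while-loop with count/base accumulators replaced by direct recursion over the adder-tree levels (leaf returns (0, base), each level adds (length//2)*base and recurses on the ceil-halved length).
import Mathlib
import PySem

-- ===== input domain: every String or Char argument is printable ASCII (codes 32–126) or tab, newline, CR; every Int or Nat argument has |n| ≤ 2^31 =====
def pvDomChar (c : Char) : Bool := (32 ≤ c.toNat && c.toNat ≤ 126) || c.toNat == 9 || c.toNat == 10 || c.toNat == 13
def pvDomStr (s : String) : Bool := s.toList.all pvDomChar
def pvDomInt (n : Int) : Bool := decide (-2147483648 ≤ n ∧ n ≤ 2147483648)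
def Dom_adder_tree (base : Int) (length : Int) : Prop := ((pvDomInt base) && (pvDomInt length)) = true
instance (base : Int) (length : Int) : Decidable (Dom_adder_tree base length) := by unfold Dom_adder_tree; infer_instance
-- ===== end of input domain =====

-- B rewrites A's while-loop as direct recursion over the adder-tree levels; same values, alternative decomposition.

-- ===== PORT A =====
-- termination helper for both ports: ceil(length/2) (= floor((length+1)/2), exact for all ints) shrinks while length > 1
theorem pv_ceil_half_lt (length : Int) (h : 1 < length) :
    (PySem.Int.floordiv (length + 1) 2).toNat < length.toNat := by
  rw [PySem.Int.floordiv_eq_ediv_of_pos (by omega)]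
  omega

-- A's while-loop, state (count, base_i, length); math.ceil(length/2) ported exactly as floordiv (length+1) 2
def adder_tree_loop (count : Int) (base_i : Int) (length : Int) : Int × Int :=
  if h : 1 < length then
    adder_tree_loop (count + (PySem.Int.floordiv length 2) * base_i) (base_i + 1)
      (PySem.Int.floordiv (length + 1) 2)
  else (count, base_i)
termination_by length.toNat
decreasing_by exact pv_ceil_half_lt length h

def adder_tree (base : Int) (length : Int) : Int × Int :=
  adder_tree_loop 0 base length

-- ===== PORT B =====
def adder_tree_alt (base : Int) (length : Int) : Int × Int :=
  if _h : length ≤ 1 then (0, base)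
  else
    let r := adder_tree_alt (base + 1) (PySem.Int.floordiv (length + 1) 2)
    ((PySem.Int.floordiv length 2) * base + r.1, r.2)
termination_by length.toNat
decreasing_by exact pv_ceil_half_lt length (by omega)

-- ===== PRECONDITION & SPEC =====
def Spec_adder_tree (base : Int) (length : Int) (out : Int × Int) : Prop := out = adder_tree_alt base length
instance (base : Int) (length : Int) (out : Int × Int) : Decidable (Spec_adder_tree base length out) := by unfold Spec_adder_tree; infer_instance

-- ===== CLAIM (what is proved, stated in full; the proofs are below) =====
def Claim_equal_adder_tree : Prop := ∀ (base : Int) (length : Int), Dom_adder_tree base length → Spec_adder_tree base length (adder_tree base length)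

-- ===== LEMMAS AND PROOFS =====
theorem adder_tree_loop_eq_alt (count base length : Int) :
    adder_tree_loop count base length =
      (count + (adder_tree_alt base length).1, (adder_tree_alt base length).2) := by
  fun_induction adder_tree_loop count base length with
  | case1 count base_i length h ih =>
      rw [ih]
      conv_rhs => rw [adder_tree_alt]
      rw [dif_neg (by omega : ¬ length ≤ 1)]
      exact Prod.ext (by ring) rfl
  | case2 count base_i length h =>
      rw [adder_tree_alt, dif_pos (by omega : length ≤ 1)]
      simp

-- ===== VERDICT (by name: the statement is the Claim_ definition above) =====
theorem adder_tree_spec : Claim_equal_adder_tree := by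
  intro base length _
  unfold Spec_adder_tree adder_tree
  rw [adder_tree_loop_eq_alt]
  simp
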